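-- pv_equiv track=rewrite | github.com/arunike/CareerHub-API | src/availability/views/booking.py | _normalize_timezone_code
-- ===== SOURCE A (Python) =====
-- TIMEZONE_CODE_TO_NAME = {
--     'PT': 'America/Los_Angeles',
--     'MT': 'America/Denver',
--     'CT': 'America/Chicago',
--     'ET': 'America/New_York',
-- }
--
-- def _normalize_timezone_code(value):
--     if not value:
--         return 'PT'
--     upper = str(value).strip().upper()
--     if upper in TIMEZONE_CODE_TO_NAME:
--         return upper
--     for code, tz_name in TIMEZONE_CODE_TO_NAME.items():
--         if upper == tz_name.upper():
--             return code
--     return 'PT'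
-- ===== SOURCE B (Python) =====
-- # B derives the canonical code from the input's shape (two-letter code pattern,
-- # or 'AMERICA/<CITY>' suffix dispatch) instead of consulting the code->name table.
--
-- def _normalize_timezone_code(value):
--     if not value:
--         return 'PT'
--     upper = str(value).strip().upper()
--     if len(upper) == 2 and upper.endswith('T') and upper[0] in ('P', 'M', 'C', 'E'):
--         return upper
--     if upper.startswith('AMERICA/'):
--         city = upper[8:]
--         if city == 'LOS_ANGELES':
--             return 'PT'
--         if city == 'DENVER':
--             return 'MT'
--         if city == 'CHICAGO':
--             return 'CT'
--         if city == 'NEW_YORK':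
--             return 'ET'
--     return 'PT'
-- ===== Notes on version B (the rewrite author's own statement) =====
-- stated objective: alternative
-- what changed: B drops the code-to-name table entirely: it recognizes a canonical code by its shape (length-2 string ending in 'T' with first letter in P/M/C/E) and otherwise dispatches on the 'AMERICA/' prefix plus city suffix to derive the code, instead of A's dict membership test followed by a linear scan over the table's uppercased names.
import Mathlib
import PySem

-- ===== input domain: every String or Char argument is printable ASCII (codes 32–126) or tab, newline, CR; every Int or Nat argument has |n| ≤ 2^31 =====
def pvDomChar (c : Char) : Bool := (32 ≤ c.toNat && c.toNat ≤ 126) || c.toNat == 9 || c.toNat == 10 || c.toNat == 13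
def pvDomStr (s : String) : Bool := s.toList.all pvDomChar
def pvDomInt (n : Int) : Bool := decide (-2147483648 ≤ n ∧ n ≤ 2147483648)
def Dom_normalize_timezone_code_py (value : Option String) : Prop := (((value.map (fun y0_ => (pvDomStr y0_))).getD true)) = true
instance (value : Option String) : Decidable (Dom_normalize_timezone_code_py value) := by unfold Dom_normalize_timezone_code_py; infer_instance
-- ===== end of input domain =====

-- B derives the canonical code from the input's shape (two-letter code pattern, 'AMERICA/<CITY>' suffix dispatch) instead of consulting the code->name table (alternative decomposition).


-- ===== PORT A =====
def TIMEZONE_CODE_TO_NAME : PySem.Dict String String :=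
  PySem.Dict.ofList [("PT", "America/Los_Angeles"), ("MT", "America/Denver"),
                     ("CT", "America/Chicago"), ("ET", "America/New_York")]

-- the 'for code, tz_name in TIMEZONE_CODE_TO_NAME.items()' loop
def pvScanNames : List (String × String) → String → String
  | [], _ => "PT"
  | (code, tz_name) :: rest, upper =>
      if upper = PySem.Str.upper tz_name then code else pvScanNames rest upper

def normalize_timezone_code_py (value : Option String) : String :=
  match value with
  | none => "PT"
  | some s =>
      if s = "" then "PT"
      else
        let upper := PySem.Str.upper (PySem.Str.strip s)
        if TIMEZONE_CODE_TO_NAME.contains upper then upper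
        else pvScanNames TIMEZONE_CODE_TO_NAME.items upper

-- ===== PORT B =====
-- 'upper[0] in ('P','M','C','E')' compares the length-1 string upper[0] against
-- 1-character strings; ported exactly as the corresponding Option Char comparison.
def normalize_timezone_code_py_alt (value : Option String) : String :=
  match value with
  | none => "PT"
  | some s =>
      if s = "" then "PT"
      else
        let upper := PySem.Str.upper (PySem.Str.strip s)
        if PySem.Str.len upper == 2 && PySem.Str.endswith upper "T" &&
           (PySem.Str.pyGet? upper 0 == some 'P' || PySem.Str.pyGet? upper 0 == some 'M' ||
            PySem.Str.pyGet? upper 0 == some 'C' || PySem.Str.pyGet? upper 0 == some 'E') then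
          upper
        else if PySem.Str.startswith upper "AMERICA/" then
          let city := PySem.Str.slice upper (some 8) none
          if city = "LOS_ANGELES" then "PT"
          else if city = "DENVER" then "MT"
          else if city = "CHICAGO" then "CT"
          else if city = "NEW_YORK" then "ET"
          else "PT"
        else "PT"

-- ===== PRECONDITION & SPEC =====
def Spec_normalize_timezone_code_py (value : Option String) (out : String) : Prop := out = normalize_timezone_code_py_alt value
instance (value : Option String) (out : String) : Decidable (Spec_normalize_timezone_code_py value out) := by unfold Spec_normalize_timezone_code_py; infer_instance

-- ===== CLAIM (what is proved, stated in full; the proofs are below) =====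
def Claim_equal_normalize_timezone_code_py : Prop := ∀ (value : Option String), Dom_normalize_timezone_code_py value → Spec_normalize_timezone_code_py value (normalize_timezone_code_py value)

-- ===== LEMMAS AND PROOFS =====

-- A's core branch, for u outside the eight recognised strings, returns "PT"
theorem pvA_other (u : String)
    (h1 : u ≠ "PT") (h2 : u ≠ "MT") (h3 : u ≠ "CT") (h4 : u ≠ "ET")
    (h5 : u ≠ "AMERICA/LOS_ANGELES") (h6 : u ≠ "AMERICA/DENVER")
    (h7 : u ≠ "AMERICA/CHICAGO") (h8 : u ≠ "AMERICA/NEW_YORK") :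
    (if TIMEZONE_CODE_TO_NAME.contains u then u
     else pvScanNames TIMEZONE_CODE_TO_NAME.items u) = "PT" := by
  have e1 : ("PT" == u) = false := by simp [Ne.symm h1]
  have e2 : ("MT" == u) = false := by simp [Ne.symm h2]
  have e3 : ("CT" == u) = false := by simp [Ne.symm h3]
  have e4 : ("ET" == u) = false := by simp [Ne.symm h4]
  rw [show TIMEZONE_CODE_TO_NAME = PySem.Dict.mk
    [("PT", "America/Los_Angeles"), ("MT", "America/Denver"),
     ("CT", "America/Chicago"), ("ET", "America/New_York")] from rfl]
  simp [PySem.Dict.contains, pvScanNames, e1, e2, e3, e4,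
        show PySem.Str.upper "America/Los_Angeles" = "AMERICA/LOS_ANGELES" from rfl,
        show PySem.Str.upper "America/Denver" = "AMERICA/DENVER" from rfl,
        show PySem.Str.upper "America/Chicago" = "AMERICA/CHICAGO" from rfl,
        show PySem.Str.upper "America/New_York" = "AMERICA/NEW_YORK" from rfl,
        h5, h6, h7, h8]

-- B's core branch, for u outside the eight recognised strings, returns "PT"
theorem pvB_other (u : String)
    (h1 : u ≠ "PT") (h2 : u ≠ "MT") (h3 : u ≠ "CT") (h4 : u ≠ "ET")
    (h5 : u ≠ "AMERICA/LOS_ANGELES") (h6 : u ≠ "AMERICA/DENVER")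
    (h7 : u ≠ "AMERICA/CHICAGO") (h8 : u ≠ "AMERICA/NEW_YORK") :
    (if PySem.Str.len u == 2 && PySem.Str.endswith u "T" &&
        (PySem.Str.pyGet? u 0 == some 'P' || PySem.Str.pyGet? u 0 == some 'M' ||
         PySem.Str.pyGet? u 0 == some 'C' || PySem.Str.pyGet? u 0 == some 'E') then u
     else if PySem.Str.startswith u "AMERICA/" then
       let city := PySem.Str.slice u (some 8) none
       if city = "LOS_ANGELES" then "PT"
       else if city = "DENVER" then "MT"
       else if city = "CHICAGO" then "CT"
       else if city = "NEW_YORK" then "ET"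
       else "PT"
     else "PT") = "PT" := by
  have hcode : ¬ (PySem.Str.len u == 2 && PySem.Str.endswith u "T" &&
        (PySem.Str.pyGet? u 0 == some 'P' || PySem.Str.pyGet? u 0 == some 'M' ||
         PySem.Str.pyGet? u 0 == some 'C' || PySem.Str.pyGet? u 0 == some 'E')) = true := by
    intro hc
    simp only [Bool.and_eq_true, Bool.or_eq_true, beq_iff_eq] at hc
    obtain ⟨⟨hlen, hend⟩, hfst⟩ := hc
    have hlen' : u.toList.length = 2 := by
      simp [PySem.Str.len_eq] at hlen; exact_mod_cast hlen
    obtain ⟨a, b, hul⟩ := List.length_eq_two.mp hlen'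
    have hb : b = 'T' := by
      rw [PySem.Str.endswith_eq] at hend
      have h2 : ['T'] <:+ [a, b] := by
        have := (PySem.Chars.endswith_iff _ _).mp hend
        rw [hul] at this; simpa using this
      rcases h2 with ⟨t, ht⟩
      cases t with
      | nil => simp at ht
      | cons x xs =>
          cases xs with
          | nil => exact (by simpa using ht : x = a ∧ 'T' = b).2.symm
          | cons y ys => exact absurd (congrArg List.length ht) (by simp)
    have hget : ∀ c : Char, PySem.Str.pyGet? u 0 = some c → a = c := by
      intro c h
      rw [show ((0:Int)) = ((0:Nat):Int) from rfl, PySem.Str.pyGet?_natCast, hul] at h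
      simpa using h
    subst hb
    rcases hfst with ((h | h) | h) | h
    · exact h1 (String.toList_inj.mp (by rw [hul, hget _ h]; rfl))
    · exact h2 (String.toList_inj.mp (by rw [hul, hget _ h]; rfl))
    · exact h3 (String.toList_inj.mp (by rw [hul, hget _ h]; rfl))
    · exact h4 (String.toList_inj.mp (by rw [hul, hget _ h]; rfl))
  rw [if_neg hcode]
  by_cases hs : PySem.Str.startswith u "AMERICA/" = true
  · rw [if_pos hs]
    have hpre : "AMERICA/".toList <+: u.toList := by
      have := (PySem.Chars.startswith_iff (s := u.toList) (p := "AMERICA/".toList)).mp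
        (by simpa [PySem.Str.startswith_eq] using hs)
      exact this
    rcases hpre with ⟨rest, hrest⟩
    have hcity : (PySem.Str.slice u (some 8) none).toList = rest := by
      rw [PySem.Str.toList_slice]
      rw [show PySem.Chars.slice u.toList (some 8) none = PySem.List.slice u.toList (some 8) none from
        PySem.Chars.slice_eq_listSlice _ _ _]
      rw [show ((8 : Int)) = ((8 : Nat) : Int) by norm_num, PySem.List.slice_from_natCast]
      rw [← hrest]
      simp
    have key : ∀ (lit full : String), rest = lit.toList →
        u.toList = "AMERICA/".toList ++ lit.toList → full.toList = "AMERICA/".toList ++ lit.toList →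
        u = full := by
      intro lit full h1' h2' h3'
      exact String.toList_inj.mp (by rw [h2', h3'])
    by_cases c1 : PySem.Str.slice u (some 8) none = "LOS_ANGELES"
    · exact absurd (key "LOS_ANGELES" "AMERICA/LOS_ANGELES"
        (by rw [← hcity, c1]) (by rw [← hrest, ← hcity, c1]) rfl) h5
    rw [if_neg c1]
    by_cases c2 : PySem.Str.slice u (some 8) none = "DENVER"
    · exact absurd (key "DENVER" "AMERICA/DENVER"
        (by rw [← hcity, c2]) (by rw [← hrest, ← hcity, c2]) rfl) h6
    rw [if_neg c2]
    by_cases c3 : PySem.Str.slice u (some 8) none = "CHICAGO"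
    · exact absurd (key "CHICAGO" "AMERICA/CHICAGO"
        (by rw [← hcity, c3]) (by rw [← hrest, ← hcity, c3]) rfl) h7
    rw [if_neg c3]
    by_cases c4 : PySem.Str.slice u (some 8) none = "NEW_YORK"
    · exact absurd (key "NEW_YORK" "AMERICA/NEW_YORK"
        (by rw [← hcity, c4]) (by rw [← hrest, ← hcity, c4]) rfl) h8
    rw [if_neg c4]
  · rw [if_neg hs]

-- core: A's branch structure and B's shape dispatch agree on every string
theorem pv_core (u : String) :
    (if TIMEZONE_CODE_TO_NAME.contains u then u
     else pvScanNames TIMEZONE_CODE_TO_NAME.items u)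
    = (if PySem.Str.len u == 2 && PySem.Str.endswith u "T" &&
          (PySem.Str.pyGet? u 0 == some 'P' || PySem.Str.pyGet? u 0 == some 'M' ||
           PySem.Str.pyGet? u 0 == some 'C' || PySem.Str.pyGet? u 0 == some 'E') then u
       else if PySem.Str.startswith u "AMERICA/" then
         let city := PySem.Str.slice u (some 8) none
         if city = "LOS_ANGELES" then "PT"
         else if city = "DENVER" then "MT"
         else if city = "CHICAGO" then "CT"
         else if city = "NEW_YORK" then "ET"
         else "PT"
       else "PT") := by
  by_cases h1 : u = "PT"
  · subst h1; rfl
  by_cases h2 : u = "MT"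
  · subst h2; rfl
  by_cases h3 : u = "CT"
  · subst h3; rfl
  by_cases h4 : u = "ET"
  · subst h4; rfl
  by_cases h5 : u = "AMERICA/LOS_ANGELES"
  · subst h5; rfl
  by_cases h6 : u = "AMERICA/DENVER"
  · subst h6; rfl
  by_cases h7 : u = "AMERICA/CHICAGO"
  · subst h7; rfl
  by_cases h8 : u = "AMERICA/NEW_YORK"
  · subst h8; rfl
  rw [pvA_other u h1 h2 h3 h4 h5 h6 h7 h8, pvB_other u h1 h2 h3 h4 h5 h6 h7 h8]

-- ===== VERDICT (by name: the statement is the Claim_ definition above) =====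
theorem normalize_timezone_code_py_spec : Claim_equal_normalize_timezone_code_py := by
  intro value _
  unfold Spec_normalize_timezone_code_py normalize_timezone_code_py normalize_timezone_code_py_alt
  match value with
  | none => rfl
  | some s =>
      by_cases hs : s = ""
      · simp [hs]
      · simp only [hs, if_false]
        exact pv_core _
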